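-- pv_equiv track=rewrite | github.com/BriefyHQ/briefy.leica | src/briefy/leica/utils/state_history.py | find_wrong
-- ===== SOURCE A (Python) =====
-- import typing as t
--
-- def find_wrong(state_history: t.List[dict], state: str, skip: list) -> int:
--     """Find transition in the wrong position."""
--     wrong_position = None
--     total = len(state_history)
--     for i, transition in enumerate(state_history):
--         if i in skip:
--             continue
--         if i == 0 and transition.get('to') != 'created':
--             wrong_position = i
--             break
--         if 1 <= i < total:
--             previous = state_history[i-1]
--             if transition.get('from') != previous.get('to'):
--                 wrong_position = i
--                 break
--         if i == total and transition.get('to') != state: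
--             wrong_position = i
--             break
--     return wrong_position
-- ===== SOURCE B (Python) =====
-- def find_wrong(state_history, state, skip):
--     """Find transition in the wrong position."""
--     violations = {
--         i for i, transition in enumerate(state_history)
--         if (transition.get('from') != state_history[i - 1].get('to') if i
--             else transition.get('to') != 'created')
--     }
--     candidates = violations - set(skip)
--     return min(candidates) if candidates else None
-- ===== Notes on version B (the rewrite author's own statement) =====
-- stated objective: alternative
-- what changed: Replaces A's early-exit multi-branch scan (with back-indexing, skip tested inside the loop, and a dead i==total branch) by a declarative set pipeline: build the full set of violating indices with one comprehension, subtract set(skip), and return the minimum of the remainder (or None).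
import Mathlib
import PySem

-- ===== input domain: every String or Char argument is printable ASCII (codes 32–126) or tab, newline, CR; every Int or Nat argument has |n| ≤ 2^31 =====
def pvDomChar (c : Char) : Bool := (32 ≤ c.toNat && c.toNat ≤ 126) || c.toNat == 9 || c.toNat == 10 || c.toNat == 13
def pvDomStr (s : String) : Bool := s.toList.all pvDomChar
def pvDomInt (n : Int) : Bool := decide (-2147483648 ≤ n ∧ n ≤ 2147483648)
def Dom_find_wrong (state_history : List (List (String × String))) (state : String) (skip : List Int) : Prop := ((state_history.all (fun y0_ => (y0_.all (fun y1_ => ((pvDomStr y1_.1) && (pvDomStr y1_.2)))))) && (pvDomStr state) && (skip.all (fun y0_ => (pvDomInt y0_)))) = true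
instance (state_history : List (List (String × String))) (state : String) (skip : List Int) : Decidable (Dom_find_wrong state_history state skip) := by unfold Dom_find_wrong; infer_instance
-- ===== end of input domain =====

-- B replaces A's early-exit multi-branch scan by a declarative set pipeline: build the full set of
-- violating indices, subtract set(skip), take the minimum (objective: alternative).

-- ===== PORT A =====
-- dict.get(k): first-match lookup on the association list (the Python dict).
def dget (l : List (String × String)) (k : String) : Option String :=
  (PySem.Dict.mk l).get? k

-- the `for i, transition in enumerate(state_history)` loop of A, with early `break` as `some i`
def findWrongLoopA (sh : List (List (String × String))) (state : String) (skip : List Int)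
    (total : Nat) : Nat → List (List (String × String)) → Option Int
  | _, [] => none
  | i, transition :: rest =>
    if (i : Int) ∈ skip then
      findWrongLoopA sh state skip total (i + 1) rest
    else if i = 0 ∧ dget transition "to" ≠ some "created" then
      some (i : Int)
    else if (1 ≤ i ∧ i < total) ∧
        dget transition "from" ≠ dget (PySem.List.pyGetD sh ((i : Int) - 1) []) "to" then
      some (i : Int)
    else if i = total ∧ dget transition "to" ≠ some state then
      some (i : Int)
    else
      findWrongLoopA sh state skip total (i + 1) rest

def find_wrong (state_history : List (List (String × String))) (state : String) (skip : List Int) : Option Int :=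
  findWrongLoopA state_history state skip state_history.length 0 state_history

-- ===== PORT B =====
-- the filter of B's set comprehension: index 0 checks 'to' != 'created', index i >= 1 checks
-- transition['from'] != state_history[i-1]['to']
def violGuard (sh : List (List (String × String))) (p : Int × List (String × String)) : Bool :=
  if p.1 ≠ 0 then decide (dget p.2 "from" ≠ dget (PySem.List.pyGetD sh (p.1 - 1) []) "to")
  else decide (dget p.2 "to" ≠ some "created")

def find_wrong_alt (state_history : List (List (String × String))) (state : String) (skip : List Int) : Option Int :=
  let violations : PySem.Set Int :=
    PySem.Set.ofList (((PySem.List.enumerate state_history 0).filter (violGuard state_history)).map (·.1))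
  let candidates : PySem.Set Int := PySem.Set.diff violations (PySem.Set.ofList skip)
  PySem.List.min? candidates (fun x => x)

-- ===== PRECONDITION & SPEC =====
def Spec_find_wrong (state_history : List (List (String × String))) (state : String) (skip : List Int) (out : Option Int) : Prop := out = find_wrong_alt state_history state skip
instance (state_history : List (List (String × String))) (state : String) (skip : List Int) (out : Option Int) : Decidable (Spec_find_wrong state_history state skip out) := by unfold Spec_find_wrong; infer_instance

-- ===== CLAIM (what is proved, stated in full; the proofs are below) =====
def Claim_equal_find_wrong : Prop := ∀ (state_history : List (List (String × String))) (state : String) (skip : List Int), Dom_find_wrong state_history state skip → Spec_find_wrong state_history state skip (find_wrong state_history state skip)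

-- ===== LEMMAS AND PROOFS =====

-- folding min over a list dominated by the seed returns the seed
theorem foldl_min_eq (x : Int) (t : List Int) (h : ∀ y ∈ t, x ≤ y) : t.foldl min x = x := by
  induction t with
  | nil => rfl
  | cons a t ih =>
    simp only [List.foldl_cons]
    rw [min_eq_left (h a (by simp))]
    exact ih (fun y hy => h y (by simp [hy]))

-- min of a strictly increasing list is its head
theorem min?_of_pairwise (l : List Int) (h : l.Pairwise (· < ·)) :
    PySem.List.min? l (fun y => y) = l.head? := by
  cases l with
  | nil => rfl
  | cons x t =>
    rw [PySem.List.min?_id_cons,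
      foldl_min_eq x t (fun y hy => le_of_lt ((List.pairwise_cons.mp h).1 y hy))]
    rfl

-- A's break-on-first-violation loop from index k equals the head of B's skip-filtered
-- violation list over the corresponding suffix
theorem loopA_eq_filtered (sh : List (List (String × String))) (state : String) (skip : List Int) :
    ∀ (tail : List (List (String × String))) (k : Nat), sh.drop k = tail →
      findWrongLoopA sh state skip sh.length k tail =
        ((((PySem.List.enumerate tail (k : Int)).filter (violGuard sh)).map (·.1)).filter
          (fun i => !(PySem.Set.ofList skip).contains i)).head? := by
  intro tail
  induction tail with
  | nil => intro k _; simp [findWrongLoopA, PySem.List.enumerate]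
  | cons t rest ih =>
    intro k hdrop
    have hklt : k < sh.length := by
      by_contra hge
      have : sh.drop k = [] := List.drop_eq_nil_of_le (by omega)
      simp [this] at hdrop
    have hdropk1 : sh.drop (k + 1) = rest := by
      have h1 : sh.drop (k + 1) = (sh.drop k).drop 1 := by rw [List.drop_drop]
      rw [h1, hdrop]; rfl
    have ihs := ih (k + 1) hdropk1
    have hcast : ((k : Int) + 1) = ((k + 1 : Nat) : Int) := by push_cast; ring
    have henum : PySem.List.enumerate (t :: rest) (k : Int) =
        ((k : Int), t) :: PySem.List.enumerate rest ((k + 1 : Nat) : Int) := by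
      rw [PySem.List.enumerate_cons, hcast]
    rw [henum]
    simp only [findWrongLoopA]
    by_cases hmem : (k : Int) ∈ skip
    · rw [if_pos hmem, ihs]
      by_cases hg : violGuard sh ((k : Int), t) = true
      · rw [List.filter_cons_of_pos hg]
        simp only [List.map_cons]
        rw [List.filter_cons_of_neg (by simp [hmem])]
      · rw [List.filter_cons_of_neg (by simp [hg])]
    · rw [if_neg hmem]
      have hP : (!(PySem.Set.ofList skip).contains ((k : Int))) = true := by
        simp [hmem]
      by_cases hk0 : k = 0
      · subst hk0
        have hguard : violGuard sh ((0 : Nat), t) =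
            decide (dget t "to" ≠ some "created") := by
          simp [violGuard]
        by_cases hcr : dget t "to" ≠ some "created"
        · rw [if_pos ⟨rfl, hcr⟩]
          rw [List.filter_cons_of_pos (by rw [hguard]; simpa using hcr)]
          simp only [List.map_cons]
          have hmem0 : (0 : Int) ∉ skip := by exact_mod_cast hmem
          simp [hmem0]
        · rw [if_neg (by tauto)]
          rw [if_neg (by rintro ⟨⟨h1, -⟩, -⟩; omega)]
          rw [if_neg (by rintro ⟨h1, -⟩; omega)]
          rw [List.filter_cons_of_neg (by rw [hguard]; simpa using hcr), ihs]
      · have hk1 : 1 ≤ k := by omega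
        have hguard : violGuard sh ((k : Nat), t) =
            decide (dget t "from" ≠ dget (PySem.List.pyGetD sh ((k : Int) - 1) []) "to") := by
          simp [violGuard, hk0]
        by_cases hbad : dget t "from" ≠ dget (PySem.List.pyGetD sh ((k : Int) - 1) []) "to"
        · rw [if_neg (by rintro ⟨h0, -⟩; exact hk0 h0)]
          rw [if_pos ⟨⟨hk1, hklt⟩, hbad⟩]
          rw [List.filter_cons_of_pos (by rw [hguard]; simpa using hbad)]
          simp only [List.map_cons]
          simp [hmem]
        · rw [if_neg (by rintro ⟨h0, -⟩; exact hk0 h0)]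
          rw [if_neg (by tauto)]
          rw [if_neg (by rintro ⟨h1, -⟩; omega)]
          rw [List.filter_cons_of_neg (by rw [hguard]; simpa using hbad), ihs]

theorem find_wrong_eq_alt (sh : List (List (String × String))) (state : String)
    (skip : List Int) : find_wrong sh state skip = find_wrong_alt sh state skip := by
  have hmain := loopA_eq_filtered sh state skip sh 0 (by simp)
  have hV : (((PySem.List.enumerate sh 0).filter (violGuard sh)).map (·.1)).Pairwise
      (fun a b => a < b) := by
    have h1 : ((PySem.List.enumerate sh (0 : Int)).filter (violGuard sh)).Pairwise
        (fun p q => p.1 < q.1) :=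
      (PySem.List.pairwise_lt_enumerate sh 0).filter _
    rw [List.pairwise_map]
    exact h1
  have hnd : (((PySem.List.enumerate sh 0).filter (violGuard sh)).map (·.1)).Nodup :=
    hV.imp (fun hlt => ne_of_lt hlt)
  unfold find_wrong find_wrong_alt
  simp only []
  rw [show (PySem.Set.diff
        (PySem.Set.ofList (((PySem.List.enumerate sh 0).filter (violGuard sh)).map (·.1)))
        (PySem.Set.ofList skip)) =
      ((((PySem.List.enumerate sh 0).filter (violGuard sh)).map (·.1)).filter
        (fun i => !(PySem.Set.ofList skip).contains i)) from by
    rw [PySem.Set.diff, PySem.Set.ofList_eq_self_of_nodup _ hnd]]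
  rw [min?_of_pairwise _ (hV.filter _)]
  simpa using hmain

-- ===== VERDICT (by name: the statement is the Claim_ definition above) =====
theorem find_wrong_spec : Claim_equal_find_wrong := by
  intro state_history state skip _
  exact find_wrong_eq_alt state_history state skip
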